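-- pv_equiv track=rewrite | github.com/rakesh-050791/DS-Algo | Advance/Queues/24-November-2022.py | solve
-- ===== SOURCE A (Python) =====
-- from collections import deque
-- from collections import deque
-- from collections import deque
-- from collections import deque
--
-- def solve(A, B):
--     n = len(A)
--     myQueue = deque(A)
--     count = 0
--
--     if A == B:
--         return n
--     else:
--
--         for i in B:
--             while i != myQueue[0]:
--                 x = myQueue.popleft()
--                 myQueue.append(x)
--                 count += 1
--
--             myQueue.popleft()
--             count += 1
--     return count
-- ===== SOURCE B (Python) =====
-- def solve(A, B):
--     # Simulate the deque by an index splice: for each target, jump straight to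
--     # its first occurrence instead of rotating one element at a time.
--     q = list(A)
--     count = 0
--     for v in B:
--         i = q.index(v)
--         count += i + 1
--         q = q[i + 1:] + q[:i]
--     return count
-- ===== Notes on version B (the rewrite author's own statement) =====
-- stated objective: simpler
-- what changed: Replaces the deque with element-by-element rotation (inner while loop) and the special A==B early return by a direct list simulation: find the target's first index, add index+1 to the count, and splice the list once per target; no inner rotation loop and no equality special case.
import Mathlib
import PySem

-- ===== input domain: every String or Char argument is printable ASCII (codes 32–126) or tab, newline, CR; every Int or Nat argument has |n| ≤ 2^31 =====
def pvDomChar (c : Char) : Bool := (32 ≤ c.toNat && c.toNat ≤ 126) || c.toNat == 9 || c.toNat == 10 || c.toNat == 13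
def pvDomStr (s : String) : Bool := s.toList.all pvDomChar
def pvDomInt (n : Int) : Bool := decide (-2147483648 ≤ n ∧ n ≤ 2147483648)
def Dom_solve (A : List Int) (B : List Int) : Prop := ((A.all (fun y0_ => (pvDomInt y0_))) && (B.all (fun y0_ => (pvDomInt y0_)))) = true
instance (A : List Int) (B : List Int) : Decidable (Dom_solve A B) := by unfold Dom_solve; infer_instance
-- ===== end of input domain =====

-- B replaces A's deque with its one-element-at-a-time rotation loop (and A's A==B
-- early return) by a direct index-and-splice simulation; objective: simpler.

-- ===== PORT A =====
-- the inner `while i != myQueue[0]` rotation loop; fuel = current queue length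
-- (enough whenever the target is present; `none` models divergence / IndexError)
def rotA (fuel : Nat) (v : Int) (q : List Int) (c : Int) : Option (List Int × Int) :=
  match fuel, q with
  | 0, _ => none
  | _ + 1, [] => none
  | f + 1, x :: rest => if v ≠ x then rotA f v (rest ++ [x]) (c + 1) else some (x :: rest, c)

-- one iteration of A's `for i in B` loop: rotate to the target, then popleft
def stepA (st : Option (List Int × Int)) (v : Int) : Option (List Int × Int) :=
  match st with
  | none => none
  | some (q, c) =>
    match rotA q.length v q c with
    | none => none
    | some (q', c') => some (q'.drop 1, c' + 1)

def solve (A : List Int) (B : List Int) : Int :=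
  let n : Int := A.length
  if A = B then n
  else
    match B.foldl stepA (some (A, 0)) with
    | some (_, c) => c
    | none => 0      -- unreachable under Pre_solve (Python diverges / raises there)

-- ===== PORT B =====
-- one iteration of B's loop: i = q.index(v); count += i+1; q = q[i+1:] + q[:i]
def stepB (st : Option (List Int × Int)) (v : Int) : Option (List Int × Int) :=
  match st with
  | none => none
  | some (q, c) =>
    match PySem.List.index? q v with
    | none => none   -- q.index(v) raises ValueError; excluded by Pre_solve
    | some i => some (q.drop (i + 1) ++ q.take i, c + (i : Int) + 1)

def solve_alt (A : List Int) (B : List Int) : Int :=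
  match B.foldl stepB (some (A, 0)) with
  | some (_, c) => c
  | none => 0

-- ===== PRECONDITION & SPEC =====
-- Pre_ excludes exactly the inputs where A diverges (rotating forever looking for a
-- value no longer in the queue) and B raises ValueError: B must be drawable from A's
-- multiset in order, i.e. no value occurs more often in B than in A.
def Pre_solve (A : List Int) (B : List Int) : Prop := ∀ v ∈ B, B.count v ≤ A.count v
instance (A : List Int) (B : List Int) : Decidable (Pre_solve A B) := by unfold Pre_solve; infer_instance
def pvWitness_solve : List Int × List Int := ([1, 2, 3, 2], [2, 1, 3])

def Spec_solve (A : List Int) (B : List Int) (out : Int) : Prop := out = solve_alt A B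
instance (A : List Int) (B : List Int) (out : Int) : Decidable (Spec_solve A B out) := by unfold Spec_solve; infer_instance

-- ===== CLAIM (what is proved, stated in full; the proofs are below) =====
def Claim_equal_solve : Prop := ∀ (A : List Int) (B : List Int), Dom_solve A B → Pre_solve A B → Spec_solve A B (solve A B)

-- ===== LEMMAS AND PROOFS =====

-- rotating until the front equals v lands at v's first index k, having cycled the
-- first k elements to the back and added k to the count
theorem rotA_spec (fuel : Nat) : ∀ (q : List Int) (v : Int) (c : Int) (k : Nat),
    PySem.List.index? q v = some k → k < fuel →
    rotA fuel v q c = some (q.drop k ++ q.take k, c + k) := by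
  induction fuel with
  | zero => intro q v c k _ h; omega
  | succ f ih =>
    intro q v c k hidx hk
    match q with
    | [] => simp [PySem.List.index?_eq_idxOf?] at hidx
    | x :: rest =>
      by_cases hvx : v = x
      · have hk0 : k = 0 := by
          rw [hvx, PySem.List.index?_cons_self] at hidx
          exact (Option.some_inj.mp hidx).symm
        subst hk0
        simp [rotA, hvx]
      · rw [PySem.List.index?_cons_of_ne rest (Ne.symm hvx)] at hidx
        obtain ⟨k', hk', rfl⟩ := Option.map_eq_some_iff.mp hidx
        have hvmem : v ∈ rest := (PySem.List.index?_isSome_iff rest v).mp (by rw [hk']; rfl)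
        have hlt : k' < rest.length := by
          obtain ⟨h, -, -⟩ := PySem.List.getElem_of_index?_eq_some hk'; exact h
        have hidx' : PySem.List.index? (rest ++ [x]) v = some k' := by
          rw [PySem.List.index?_append_of_mem _ hvmem]; exact hk'
        have hih := ih (rest ++ [x]) v (c + 1) k' hidx' (by omega)
        rw [rotA, if_pos hvx, hih]
        rw [List.drop_append_of_le_length (by omega), List.take_append_of_le_length (by omega)]
        simp only [Option.some.injEq, Prod.mk.injEq]
        refine ⟨by simp, by push_cast; omega⟩

-- when v is present in the queue, one A-step equals one B-step
theorem step_eq (q : List Int) (c : Int) (v : Int) (hv : v ∈ q) :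
    stepA (some (q, c)) v = stepB (some (q, c)) v := by
  obtain ⟨k, hidx⟩ := Option.isSome_iff_exists.mp ((PySem.List.index?_isSome_iff q v).mpr hv)
  obtain ⟨hklt, hqk, -⟩ := PySem.List.getElem_of_index?_eq_some hidx
  have hrot := rotA_spec q.length q v c k hidx hklt
  simp only [stepA, stepB, hrot, hidx]
  have hdropk : q.drop k = v :: q.drop (k + 1) := by
    rw [← List.getElem_cons_drop hklt, hqk]
  rw [hdropk]
  simp only [Option.some.injEq, Prod.mk.injEq]
  refine ⟨by simp, trivial⟩

-- the queue after one step carries one fewer copy of v and the same count of all else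
theorem count_after_step (q : List Int) (v : Int) (k : Nat)
    (hidx : PySem.List.index? q v = some k) (w : Int) :
    q.count w = (q.drop (k + 1) ++ q.take k).count w + (if v = w then 1 else 0) := by
  obtain ⟨hklt, hqk, -⟩ := PySem.List.getElem_of_index?_eq_some hidx
  have hdropk : q.drop k = v :: q.drop (k + 1) := by
    rw [← List.getElem_cons_drop hklt, hqk]
  conv_lhs => rw [← List.take_append_drop k q, hdropk]
  simp [List.count_append, List.count_cons]
  by_cases h : v = w <;> simp [h] <;> omega

-- the two folds agree whenever every B-value is still available in the queue
theorem fold_eq : ∀ (B q : List Int) (c : Int),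
    (∀ v ∈ B, B.count v ≤ q.count v) →
    B.foldl stepA (some (q, c)) = B.foldl stepB (some (q, c)) := by
  intro B
  induction B with
  | nil => intro q c _; rfl
  | cons v Bt ih =>
    intro q c h
    have hv : v ∈ q := by
      have := h v (List.mem_cons_self ..)
      simp [List.count_cons] at this
      exact List.count_pos_iff.mp (by omega)
    obtain ⟨k, hidx⟩ := Option.isSome_iff_exists.mp ((PySem.List.index?_isSome_iff q v).mpr hv)
    have hstep := step_eq q c v hv
    simp only [List.foldl_cons, hstep, stepB]
    rw [hidx]
    apply ih
    intro w hw
    have hcw := count_after_step q v k hidx w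
    have hle := h w (List.mem_cons_of_mem _ hw)
    simp only [List.count_cons] at hle
    by_cases hvw : v = w <;> simp [hvw] at hcw hle ⊢ <;> omega

-- B's fold on (L, L) consumes everything, adding one per element
theorem fold_self : ∀ (L : List Int) (c : Int),
    L.foldl stepB (some (L, c)) = some ([], c + L.length) := by
  intro L
  induction L with
  | nil => intro c; simp
  | cons x t ih =>
    intro c
    simp only [List.foldl_cons, stepB, PySem.List.index?_cons_self]
    have hq : (x :: t).drop (0 + 1) ++ (x :: t).take 0 = t := by simp
    rw [hq, ih (c + ((0:Nat) : Int) + 1)]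
    simp only [Option.some.injEq, Prod.mk.injEq, List.length_cons]
    refine ⟨by simp, by push_cast; omega⟩

-- ===== VERDICT (by name: the statement is the Claim_ definition above) =====
theorem solve_spec : Claim_equal_solve := by
  intro A B _ hpre
  unfold Spec_solve solve solve_alt
  by_cases hAB : A = B
  · subst hAB
    rw [fold_self A 0]
    simp
  · rw [if_neg hAB, fold_eq B A 0 hpre]
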